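-- pv_equiv track=rewrite | github.com/mattbruv/Project-Euler | src/problem052.py | sameDigits
-- ===== SOURCE A (Python) =====
-- def numToList(n):
--     ns = [int(x) for x in str(n)]
--     ns.sort()
--     return ns
--
-- def sameDigits(x, curX, maxX, compareList):
--     testList = numToList(x * curX)
--     if testList == compareList:
--         if curX == maxX:
--             return True
--         return sameDigits(x, curX + 1, maxX, compareList)
--     else:
--         return False
-- ===== SOURCE B (Python) =====
-- def numToList(n):
--     # arithmetic digit extraction (no str/int round-trip)
--     if n == 0:
--         return [0]
--     ds = []
--     while n > 0:
--         ds.append(n % 10)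
--         n //= 10
--     ds.sort()
--     return ds
--
-- def sameDigits(x, curX, maxX, compareList):
--     return curX <= maxX and all(numToList(x * k) == compareList for k in range(curX, maxX + 1))
-- ===== Notes on version B (the rewrite author's own statement) =====
-- stated objective: simpler
-- what changed: Replaces A's recursion with a one-line all() over range(curX, maxX+1) behind a curX <= maxX guard, and extracts digits arithmetically (% 10, // 10) instead of via str()/int() per character.
import Mathlib
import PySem

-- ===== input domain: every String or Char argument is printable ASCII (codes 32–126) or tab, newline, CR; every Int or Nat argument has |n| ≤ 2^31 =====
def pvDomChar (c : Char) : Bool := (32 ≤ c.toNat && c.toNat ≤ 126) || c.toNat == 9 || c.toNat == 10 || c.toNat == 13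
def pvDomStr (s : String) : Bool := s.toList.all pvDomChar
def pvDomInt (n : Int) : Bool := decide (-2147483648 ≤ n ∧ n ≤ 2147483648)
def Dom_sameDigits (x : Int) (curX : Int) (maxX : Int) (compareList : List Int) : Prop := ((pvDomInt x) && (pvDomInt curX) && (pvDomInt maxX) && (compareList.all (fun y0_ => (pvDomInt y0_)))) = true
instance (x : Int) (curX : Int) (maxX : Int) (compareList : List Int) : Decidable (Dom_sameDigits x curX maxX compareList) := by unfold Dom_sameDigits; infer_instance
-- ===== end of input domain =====

-- B replaces A's recursion by a single all() over range(curX, maxX+1) behind a curX <= maxX guard,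
-- and computes digit lists arithmetically (% 10, // 10) instead of via str(); objective: simpler.


-- ===== PORT A =====
-- numToList(n) = sorted([int(c) for c in str(n)]); int('-') raises ValueError in Python,
-- so the '.getD 0' is unreachable under Pre_ (every converted product is nonnegative there).
def numToListA (n : Int) : List Int :=
  PySem.List.sorted ((PySem.Int.toStr n).toList.map
    (fun c => (PySem.Int.ofStr? (String.mk [c])).getD 0)) (fun v => v) false

-- Literal port of A's recursion. The final 'else false' is a totalization guard for
-- curX > maxX, where the Python recursion keeps going: under Pre_ it eventually hits a
-- mismatch and returns False there (the guard returns that same value), and outside Pre_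
-- (x = 0, compareList = [0], curX > maxX) the Python recurses forever.
def sameDigits (x : Int) (curX : Int) (maxX : Int) (compareList : List Int) : Bool :=
  let testList := numToListA (x * curX)
  if testList = compareList then
    if curX = maxX then true
    else if _h : curX < maxX then sameDigits x (curX + 1) maxX compareList
    else false
  else false
termination_by (maxX - curX).toNat
decreasing_by omega

-- ===== PORT B =====
-- the 'while n > 0' loop of Source B's numToList (appends n % 10, then n //= 10)
def digitsLoopB (n : Int) : List Int :=
  if _h : 0 < n then PySem.Int.mod n 10 :: digitsLoopB (PySem.Int.floordiv n 10) else []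
termination_by n.toNat
decreasing_by
  simp only [PySem.Int.floordiv]
  rw [Int.fdiv_eq_ediv, if_pos (Or.inl (by norm_num))]
  omega

def numToListB (n : Int) : List Int :=
  if n = 0 then [0] else PySem.List.sorted (digitsLoopB n) (fun v => v) false

-- all(numToList(x*k) == compareList for k in range(curX, maxX+1)): the generator is lazy
-- and short-circuits at the first mismatch, so it is ported as a bounded recursion over k
-- (&& is short-circuiting), not as a materialized list.
def allMultiples (x : Int) (k : Int) (maxB : Int) (compareList : List Int) : Bool :=
  if _h : k < maxB then (numToListB (x * k) == compareList) && allMultiples x (k + 1) maxB compareList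
  else true
termination_by (maxB - k).toNat
decreasing_by omega

def sameDigits_alt (x : Int) (curX : Int) (maxX : Int) (compareList : List Int) : Bool :=
  decide (curX ≤ maxX) && allMultiples x curX (maxX + 1) compareList

-- ===== PRECONDITION & SPEC =====
-- Pre_ excludes exactly the inputs on which A does not return: a ValueError (the chain of
-- checked multiples starts at, or reaches, a negative product, and int('-') raises) or
-- infinite recursion (x = 0 with compareList = [0] and curX > maxX: every product is 0).
def Pre_sameDigits (x : Int) (curX : Int) (maxX : Int) (compareList : List Int) : Prop :=
  0 ≤ x * curX ∧ ¬(x = 0 ∧ compareList = [0] ∧ maxX < curX) ∧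
    ¬(x < 0 ∧ curX = 0 ∧ compareList = [0] ∧ maxX ≠ 0)
instance (x : Int) (curX : Int) (maxX : Int) (compareList : List Int) : Decidable (Pre_sameDigits x curX maxX compareList) := by unfold Pre_sameDigits; infer_instance

def pvWitness_sameDigits : Int × Int × Int × List Int := (9, 1, 2, [1, 8])

def Spec_sameDigits (x : Int) (curX : Int) (maxX : Int) (compareList : List Int) (out : Bool) : Prop := out = sameDigits_alt x curX maxX compareList
instance (x : Int) (curX : Int) (maxX : Int) (compareList : List Int) (out : Bool) : Decidable (Spec_sameDigits x curX maxX compareList out) := by unfold Spec_sameDigits; infer_instance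

-- ===== CLAIM (what is proved, stated in full; the proofs are below) =====
def Claim_equal_sameDigits : Prop := ∀ (x : Int) (curX : Int) (maxX : Int) (compareList : List Int), Dom_sameDigits x curX maxX compareList → Pre_sameDigits x curX maxX compareList → Spec_sameDigits x curX maxX compareList (sameDigits x curX maxX compareList)

-- ===== LEMMAS AND PROOFS =====

-- Nat.toDigitsCore (with enough fuel) is the reversed base-10 digit-character list
lemma toDigitsCore_eq (f : ℕ) : ∀ (n : ℕ) (l : List Char), 0 < n → n < f →
    Nat.toDigitsCore 10 f n l = ((Nat.digits 10 n).map Nat.digitChar).reverse ++ l := by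
  induction f with
  | zero => intro n l hn hf; omega
  | succ f ih =>
    intro n l hn hf
    rw [Nat.toDigitsCore]
    by_cases h : n / 10 = 0
    · simp only [h, if_true]
      have hlt : n < 10 := by omega
      rw [Nat.digits_def' (by norm_num : 1 < 10) hn, h, Nat.digits_zero]
      simp [Nat.mod_eq_of_lt hlt]
    · simp only [h, if_false]
      have h1 : 0 < n / 10 := Nat.pos_of_ne_zero h
      have h2 : n / 10 < f := by
        have := Nat.div_lt_self hn (by norm_num : 1 < 10); omega
      rw [ih (n / 10) _ h1 h2, Nat.digits_def' (by norm_num : 1 < 10) hn]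
      simp

lemma digitChar_val (d : ℕ) (hd : d < 10) :
    (PySem.Int.ofStr? (String.mk [Nat.digitChar d])).getD 0 = (d : Int) := by
  interval_cases d <;> decide

-- Source B's digit loop computes Nat.digits (cast to Int), least significant digit first
lemma digitsLoopB_nat (m : ℕ) : digitsLoopB (m : Int) = (Nat.digits 10 m).map (fun d : ℕ => (d : Int)) := by
  induction m using Nat.strong_induction_on with
  | _ m ih =>
    rw [digitsLoopB]
    by_cases hm : 0 < (m : Int)
    · rw [dif_pos hm]
      have hm' : 0 < m := by exact_mod_cast hm
      have hdiv : PySem.Int.floordiv (m : Int) 10 = ((m / 10 : ℕ) : Int) := by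
        simp only [PySem.Int.floordiv]
        rw [Int.fdiv_eq_ediv, if_pos (Or.inl (by norm_num))]
        omega
      have hmod : PySem.Int.mod (m : Int) 10 = ((m % 10 : ℕ) : Int) := by
        simp only [PySem.Int.mod]
        rw [Int.fmod_eq_emod, if_pos (Or.inl (by norm_num))]
        omega
      rw [hdiv, hmod, ih (m / 10) (Nat.div_lt_self hm' (by norm_num)),
        Nat.digits_def' (by norm_num : 1 < 10) hm']
      simp
    · rw [dif_neg hm]
      have hz : m = 0 := by omega
      subst hz; simp

lemma digitsLoopB_eq (n : Int) (hn : 0 ≤ n) :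
    digitsLoopB n = (Nat.digits 10 n.toNat).map (fun d : ℕ => (d : Int)) := by
  have h := digitsLoopB_nat n.toNat
  rwa [Int.toNat_of_nonneg hn] at h

-- the two digit-list helpers agree on nonnegative inputs
lemma numToList_eq (n : Int) (hn : 0 ≤ n) : numToListA n = numToListB n := by
  by_cases h0 : n = 0
  · subst h0; decide
  · have hpos : 0 < n := lt_of_le_of_ne hn (Ne.symm h0)
    have hm : 0 < n.toNat := by omega
    unfold numToListA numToListB
    rw [if_neg h0]
    have hchars : (PySem.Int.toStr n).toList = ((Nat.digits 10 n.toNat).map Nat.digitChar).reverse := by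
      rw [PySem.Int.toList_toStr]
      unfold PySem.Int.toChars
      rw [if_neg (by omega), Nat.toDigits,
        toDigitsCore_eq (n.toNat + 1) n.toNat [] hm (Nat.lt_succ_self _)]
      simp
    rw [hchars, List.map_reverse, List.map_map]
    have hmapeq : (Nat.digits 10 n.toNat).map
        ((fun c => (PySem.Int.ofStr? (String.mk [c])).getD 0) ∘ Nat.digitChar) =
        (Nat.digits 10 n.toNat).map (fun d : ℕ => (d : Int)) := by
      apply List.map_congr_left
      intro d hd
      exact digitChar_val d (Nat.digits_lt_base (by norm_num) hd)
    rw [hmapeq, digitsLoopB_eq n hn]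
    exact PySem.List.sorted_eq_sorted_of_perm _ _ _ (fun a b h => h) (List.reverse_perm _)

lemma numToListB_zero : numToListB 0 = [0] := by decide

lemma numToListB_ne_zero_list (m : Int) (hm : 1 ≤ m) : numToListB m ≠ [0] := by
  intro hEq
  unfold numToListB at hEq
  rw [if_neg (by omega)] at hEq
  have h1 : digitsLoopB m = [0] :=
    List.perm_singleton.mp (by rw [← hEq]; exact (PySem.List.sorted_perm _ _ _).symm)
  rw [digitsLoopB_eq m (by omega)] at h1
  have h2 : Nat.digits 10 m.toNat = [0] := by
    cases h : Nat.digits 10 m.toNat with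
    | nil => rw [h] at h1; simp at h1
    | cons a t =>
      rw [h] at h1
      simp only [List.map_cons, List.cons.injEq] at h1
      obtain ⟨ha, ht⟩ := h1
      have ha' : a = 0 := by exact_mod_cast ha
      have ht' : t = [] := by
        cases t with
        | nil => rfl
        | cons b u => simp at ht
      rw [ha', ht']
  have h3 := Nat.ofDigits_digits 10 m.toNat
  rw [h2] at h3
  have h4 : Nat.ofDigits 10 [0] = 0 := by decide
  omega

lemma allMultiples_step (x k maxB : Int) (L : List Int) (h : k < maxB) :
    allMultiples x k maxB L = ((numToListB (x * k) == L) && allMultiples x (k + 1) maxB L) := by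
  rw [allMultiples.eq_def, dif_pos h]

lemma allMultiples_end (x k maxB : Int) (L : List Int) (h : ¬ k < maxB) :
    allMultiples x k maxB L = true := by
  rw [allMultiples.eq_def, dif_neg h]

-- main loop invariant: for curX ≤ maxX, with a nonnegative first product and the excluded
-- x<0 / curX=0 / [0] corner ruled out, A's recursion equals B's range-all form
lemma sameDigits_main (d : ℕ) : ∀ (x curX maxX : Int) (L : List Int),
    (maxX - curX).toNat = d → curX ≤ maxX → 0 ≤ x * curX →
    (x < 0 → curX = 0 → curX ≠ maxX → L ≠ [0]) →
    sameDigits x curX maxX L = sameDigits_alt x curX maxX L := by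
  induction d with
  | zero =>
    intro x curX maxX L hd hle h1 _h3
    have hEq : curX = maxX := by omega
    subst hEq
    rw [sameDigits.eq_def]
    simp only [numToList_eq (x * curX) h1]
    by_cases hmatch : numToListB (x * curX) = L
    · simp [hmatch, sameDigits_alt, allMultiples_step x curX (curX + 1) L (by omega),
        allMultiples_end x (curX + 1) (curX + 1) L (by omega)]
    · simp [hmatch, sameDigits_alt, allMultiples_step x curX (curX + 1) L (by omega)]
  | succ d ih =>
    intro x curX maxX L hd hle h1 h3
    have hlt : curX < maxX := by omega
    rw [sameDigits.eq_def]
    simp only [numToList_eq (x * curX) h1]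
    by_cases hmatch : numToListB (x * curX) = L
    · rw [if_pos hmatch, if_neg (by omega : ¬ curX = maxX), dif_pos hlt]
      have h1' : 0 ≤ x * (curX + 1) := by
        rcases lt_trichotomy x 0 with hx | hx | hx
        · have hc : curX ≤ 0 := by
            by_contra hcp
            push_neg at hcp
            have := mul_neg_of_neg_of_pos hx hcp
            omega
          have hc' : curX ≠ 0 := by
            intro hzero
            refine h3 hx hzero (by omega) ?_
            rw [hzero, mul_zero] at hmatch
            rw [← hmatch, numToListB_zero]
          have hc1 : curX + 1 ≤ 0 := by omega
          nlinarith
        · simp [hx]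
        · have hc : 0 ≤ curX := by
            by_contra hcp
            push_neg at hcp
            have := mul_neg_of_pos_of_neg hx hcp
            omega
          nlinarith
      have h3' : x < 0 → curX + 1 = 0 → curX + 1 ≠ maxX → L ≠ [0] := by
        intro hx hc _ hL
        have hcm : curX = -1 := by omega
        have hprod : (1 : Int) ≤ x * curX := by
          have : x * curX = -x := by rw [hcm]; ring
          omega
        exact numToListB_ne_zero_list (x * curX) hprod (hmatch.trans hL)
      rw [ih x (curX + 1) maxX L (by omega) (by omega) h1' h3']
      have hle' : curX + 1 ≤ maxX := by omega
      simp [sameDigits_alt, allMultiples_step x curX (maxX + 1) L (by omega), hle, hle', hmatch]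
    · rw [if_neg hmatch]
      simp [sameDigits_alt, allMultiples_step x curX (maxX + 1) L (by omega), hmatch]

-- ===== VERDICT (by name: the statement is the Claim_ definition above) =====
theorem sameDigits_spec : Claim_equal_sameDigits := by
  intro x curX maxX L _hD hP
  unfold Spec_sameDigits
  rcases hP with ⟨h1, _h2, h3⟩
  by_cases hle : curX ≤ maxX
  · exact sameDigits_main (maxX - curX).toNat x curX maxX L rfl hle h1
      (fun hx hc hne hL => h3 ⟨hx, hc, hL, fun hm => hne (hc.trans hm.symm)⟩)
  · have hA : sameDigits x curX maxX L = false := by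
      rw [sameDigits.eq_def]
      simp [show ¬ curX = maxX from by omega, show ¬ curX < maxX from by omega]
    have hB : sameDigits_alt x curX maxX L = false := by
      simp [sameDigits_alt, hle]
    rw [hA, hB]
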